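-- pv_equiv track=rewrite | github.com/thomaskiefer/MultiroomSceneTrajectoryGeneration | src/trajectory_generation/walkthrough_local.py | _trim_open_path_sequence
-- ===== SOURCE A (Python) =====
-- def _trim_open_path_sequence(path_sequence: list[str]) -> list[str]:
--     """
--     Trim trailing DFS backtracking for open trajectories.
--
--     The DFS traversal intentionally includes return hops (e.g. ... C, B, A)
--     to keep a connected exploration walk. When loop closure is disabled we
--     keep all internal backtracking needed to reach new rooms, but drop the
--     final suffix that occurs only after the last new room has been visited.
--     """
--     if len(path_sequence) <= 1:
--         return path_sequence
--     seen: set[str] = set()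
--     last_new_idx = 0
--     for i, room_id in enumerate(path_sequence):
--         if room_id not in seen:
--             seen.add(room_id)
--             last_new_idx = i
--     return path_sequence[: last_new_idx + 1]
-- ===== SOURCE B (Python) =====
-- def _trim_open_path_sequence(path_sequence: list[str]) -> list[str]:
--     if len(path_sequence) <= 1:
--         return path_sequence
--     # scan backwards for the last index whose room does not occur earlier
--     for i in range(len(path_sequence) - 1, -1, -1):
--         if path_sequence[i] not in path_sequence[:i]:
--             return path_sequence[: i + 1]
--     return path_sequence  # unreachable: i == 0 always matches
-- ===== Notes on version B (the rewrite author's own statement) =====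
-- stated objective: alternative
-- what changed: B scans backwards for the last index whose room does not occur earlier in the list and cuts there, using no set at all, instead of A's forward pass maintaining a seen-set and last first-seen index.
import Mathlib
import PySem

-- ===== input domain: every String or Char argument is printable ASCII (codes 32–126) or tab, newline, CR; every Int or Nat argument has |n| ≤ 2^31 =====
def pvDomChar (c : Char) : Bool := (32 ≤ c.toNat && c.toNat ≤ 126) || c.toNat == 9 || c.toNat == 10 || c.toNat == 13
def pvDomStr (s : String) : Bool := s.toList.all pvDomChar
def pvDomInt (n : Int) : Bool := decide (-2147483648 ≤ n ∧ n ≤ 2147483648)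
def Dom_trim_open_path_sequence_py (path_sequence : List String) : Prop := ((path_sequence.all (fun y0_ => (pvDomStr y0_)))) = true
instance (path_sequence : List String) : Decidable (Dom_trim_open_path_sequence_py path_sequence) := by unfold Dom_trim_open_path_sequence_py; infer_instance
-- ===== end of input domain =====

-- B replaces A's forward seen-set pass with a backward scan for the last index whose
-- room does not occur earlier in the list; alternative decomposition, no speed claim.


-- ===== PORT A =====
-- A's loop: for i, room_id in enumerate(path_sequence): track seen set and last first-seen index.
def pvALoop (seen : PySem.Set String) (last_new_idx i : Nat) : List String → Nat
  | [] => last_new_idx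
  | room_id :: rest =>
    if PySem.Set.contains seen room_id then
      pvALoop seen last_new_idx (i + 1) rest
    else
      pvALoop (PySem.Set.add seen room_id) i (i + 1) rest

-- path_sequence[: last_new_idx + 1] with a nonnegative index is List.take (last_new_idx + 1)
def trim_open_path_sequence_py (path_sequence : List String) : List String :=
  if path_sequence.length ≤ 1 then path_sequence
  else path_sequence.take (pvALoop PySem.Set.empty 0 0 path_sequence + 1)

-- ===== PORT B =====
-- B's backward loop over i = len-1, …, 0: the first i (from the end) with
-- path_sequence[i] not in path_sequence[:i] yields the trim length i+1.
-- pvBDown p i = the trim length found scanning indices i, i-1, …, 0.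
-- p.getD i "" is exact here: the index is always in range (i < p.length at every call).
def pvBDown (p : List String) : Nat → Nat
  | 0 => 1                                  -- i = 0: p[0] ∉ p[:0] = [] always holds
  | i + 1 =>
    if (p.take (i + 1)).contains (p.getD (i + 1) "") then pvBDown p i
    else i + 2

def trim_open_path_sequence_py_alt (path_sequence : List String) : List String :=
  if path_sequence.length ≤ 1 then path_sequence
  else path_sequence.take (pvBDown path_sequence (path_sequence.length - 1))

-- ===== PRECONDITION & SPEC =====
def Spec_trim_open_path_sequence_py (path_sequence : List String) (out : List String) : Prop := out = trim_open_path_sequence_py_alt path_sequence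
instance (path_sequence : List String) (out : List String) : Decidable (Spec_trim_open_path_sequence_py path_sequence out) := by unfold Spec_trim_open_path_sequence_py; infer_instance

-- ===== CLAIM =====
def Claim_equal_trim_open_path_sequence_py : Prop := ∀ (path_sequence : List String), Dom_trim_open_path_sequence_py path_sequence → Spec_trim_open_path_sequence_py path_sequence (trim_open_path_sequence_py path_sequence)

-- ===== LEMMAS AND PROOFS =====

theorem pvSet_add_of_contains (S : PySem.Set String) (r : String)
    (h : PySem.Set.contains S r = true) : PySem.Set.add S r = S := by
  simp only [PySem.Set.add, h, if_pos]

-- A's loop, fed one more trailing element: either it is a repeat (result unchanged)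
-- or it is new (the last-new index becomes its position).
theorem pvALoop_snoc (rest : List String) :
    ∀ (S : PySem.Set String) (j i : Nat) (x : String),
      pvALoop S j i (rest ++ [x])
        = if (rest.foldl PySem.Set.add S).contains x then pvALoop S j i rest
          else i + rest.length := by
  induction rest with
  | nil =>
    intro S j i x
    by_cases h : S.contains x = true
    · simp [pvALoop]
    · simp [pvALoop]
  | cons y rest ih =>
    intro S j i x
    rw [List.cons_append]
    by_cases hy : PySem.Set.contains S y = true
    · have hfold : (y :: rest).foldl PySem.Set.add S = rest.foldl PySem.Set.add S := by
        simp [List.foldl, pvSet_add_of_contains S y hy]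
      have hA : pvALoop S j i (y :: (rest ++ [x])) = pvALoop S j (i + 1) (rest ++ [x]) := by
        simp only [pvALoop]; rw [if_pos hy]
      have hA' : pvALoop S j i (y :: rest) = pvALoop S j (i + 1) rest := by
        simp only [pvALoop]; rw [if_pos hy]
      rw [hA, ih, hfold, hA']
      split_ifs
      · rfl
      · simp only [List.length_cons]; omega
    · have hfold : (y :: rest).foldl PySem.Set.add S = rest.foldl PySem.Set.add (S.add y) := rfl
      have hA : pvALoop S j i (y :: (rest ++ [x])) = pvALoop (S.add y) i (i + 1) (rest ++ [x]) := by
        simp only [pvALoop]; rw [if_neg hy]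
      have hA' : pvALoop S j i (y :: rest) = pvALoop (S.add y) i (i + 1) rest := by
        simp only [pvALoop]; rw [if_neg hy]
      rw [hA, ih, hfold, hA']
      split_ifs
      · rfl
      · simp only [List.length_cons]; omega

-- B's downward scan only reads indices ≤ i+1, so a trailing element is invisible.
theorem pvBDown_snoc (q : List String) (x : String) :
    ∀ j, j < q.length → pvBDown (q ++ [x]) j = pvBDown q j := by
  intro j
  induction j with
  | zero => intro _; rfl
  | succ j ih =>
    intro hj
    have ht : (q ++ [x]).take (j + 1) = q.take (j + 1) := by
      rw [List.take_append_of_le_length (by omega)]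
    have hg : (q ++ [x]).getD (j + 1) "" = q.getD (j + 1) "" := by
      rw [List.getD_append _ _ _ _ (by omega)]
    rw [pvBDown, pvBDown, ht, hg]
    split
    · exact ih (by omega)
    · rfl

-- membership in foldl-accumulated set = membership in the list (empty start)
theorem pvFoldl_contains (q : List String) (x : String) :
    (q.foldl PySem.Set.add PySem.Set.empty).contains x = q.contains x := by
  have h1 : q.foldl PySem.Set.add PySem.Set.empty = PySem.Set.ofList q :=
    (PySem.Set.ofList_eq_foldl q).symm
  rw [h1]
  by_cases hx : x ∈ q
  · have : x ∈ PySem.Set.ofList q := (PySem.Set.mem_ofList q x).mpr hx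
    simp [PySem.Set.contains, this, hx]
  · have : x ∉ PySem.Set.ofList q := fun h => hx ((PySem.Set.mem_ofList q x).mp h)
    simp [PySem.Set.contains, hx, this]

-- the two loops agree: A's last-new index + 1 = B's backward-found trim length
theorem pvLoops_agree (p : List String) (hp : 1 ≤ p.length) :
    pvALoop PySem.Set.empty 0 0 p + 1 = pvBDown p (p.length - 1) := by
  induction p using List.reverseRecOn with
  | nil => simp at hp
  | append_singleton q x ih =>
    cases hq : q with
    | nil => subst hq; rfl
    | cons y ys =>
      have hqlen : 1 ≤ q.length := by rw [hq]; simp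
      rw [← hq]
      have hlen : (q ++ [x]).length - 1 = q.length := by simp
      rw [hlen, pvALoop_snoc, pvFoldl_contains]
      have hql : q.length = (q.length - 1) + 1 := by omega
      rw [hql, pvBDown]
      have ht : (q ++ [x]).take (q.length - 1 + 1) = q := by
        rw [← hql, List.take_append_of_le_length (le_refl _), List.take_length]
      have hg : (q ++ [x]).getD (q.length - 1 + 1) "" = x := by
        rw [← hql]; simp
      rw [ht, hg]
      split
      · rw [pvBDown_snoc q x _ (by omega), ← ih hqlen]
      · omega

-- ===== VERDICT =====
theorem trim_open_path_sequence_py_spec : Claim_equal_trim_open_path_sequence_py := by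
  intro p _
  unfold Spec_trim_open_path_sequence_py trim_open_path_sequence_py trim_open_path_sequence_py_alt
  by_cases hlen : p.length ≤ 1
  · rw [if_pos hlen, if_pos hlen]
  · rw [if_neg hlen, if_neg hlen, pvLoops_agree p (by omega)]
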